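-- pv_equiv track=rewrite | github.com/Lsege/JUPythonHW | Hw_3/test.py | is_occupied
-- ===== SOURCE A (Python) =====
-- def is_occupied(grid, position, by_default):
-- 	count = 0
-- 	for i in range(len(grid)):
-- 		for j in range(len(grid[i])):
-- 			count += 1
-- 			if position == count:
-- 				if grid[i][j] != by_default:
-- 					return True
-- 				else:
-- 					return False
-- ===== SOURCE B (Python) =====
-- def is_occupied(grid, position, by_default):
--     if position < 1:
--         return None
--     p = position
--     for row in grid:
--         if p <= len(row):
--             return row[p - 1] != by_default
--         p -= len(row)
--     return None
-- ===== Notes on version B (the rewrite author's own statement) =====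
-- stated objective: alternative
-- what changed: B locates the target cell by walking rows and subtracting each row's length, instead of A's cell-by-cell counter over every cell; the inner per-cell scan disappears (O(rows) vs O(total cells) cell visits, though a timing run did not confirm a uniform speed-up).
import Mathlib
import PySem

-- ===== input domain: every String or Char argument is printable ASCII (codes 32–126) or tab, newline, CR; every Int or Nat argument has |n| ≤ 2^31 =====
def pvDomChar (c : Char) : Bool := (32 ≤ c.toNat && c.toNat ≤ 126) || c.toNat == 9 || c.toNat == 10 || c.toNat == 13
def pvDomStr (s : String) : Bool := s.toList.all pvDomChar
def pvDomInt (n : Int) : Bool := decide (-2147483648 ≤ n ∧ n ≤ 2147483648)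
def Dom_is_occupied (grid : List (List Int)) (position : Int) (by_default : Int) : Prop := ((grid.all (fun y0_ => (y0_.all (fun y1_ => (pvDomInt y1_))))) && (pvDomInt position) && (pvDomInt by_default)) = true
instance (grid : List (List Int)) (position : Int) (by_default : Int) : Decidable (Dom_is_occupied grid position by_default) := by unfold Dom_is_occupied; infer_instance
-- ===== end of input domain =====

-- B locates the target cell by subtracting row lengths row by row instead of A's per-cell counter over every cell (alternative decomposition).


-- ===== PORT A =====
-- inner loop over one row: increments count; returns (some b, _) on Python's return, else (none, final count)
def isOccInner (row : List Int) (position by_default count : Int) : Option Bool × Int :=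
  match row with
  | [] => (none, count)
  | x :: xs =>
    let count := count + 1
    if position == count then
      (some (decide (x ≠ by_default)), count)
    else
      isOccInner xs position by_default count

-- outer loop over rows, threading the counter
def isOccOuter (grid : List (List Int)) (position by_default count : Int) : Option Bool :=
  match grid with
  | [] => none
  | r :: rs =>
    let res := isOccInner r position by_default count
    match res.1 with
    | some b => some b
    | none => isOccOuter rs position by_default res.2

def is_occupied (grid : List (List Int)) (position : Int) (by_default : Int) : Option Bool :=
  isOccOuter grid position by_default 0

-- ===== PORT B =====
-- walk rows subtracting row lengths; index row[p-1] is ported exactly via pyGet?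
def isOccAltLoop (grid : List (List Int)) (p by_default : Int) : Option Bool :=
  match grid with
  | [] => none
  | row :: rest =>
    if p ≤ (row.length : Int) then
      match PySem.List.pyGet? row (p - 1) with
      | some v => some (decide (v ≠ by_default))
      | none => none
    else
      isOccAltLoop rest (p - (row.length : Int)) by_default

def is_occupied_alt (grid : List (List Int)) (position : Int) (by_default : Int) : Option Bool :=
  if position < 1 then none
  else isOccAltLoop grid position by_default

-- ===== PRECONDITION & SPEC =====
def Spec_is_occupied (grid : List (List Int)) (position : Int) (by_default : Int) (out : Option Bool) : Prop := out = is_occupied_alt grid position by_default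
instance (grid : List (List Int)) (position : Int) (by_default : Int) (out : Option Bool) : Decidable (Spec_is_occupied grid position by_default out) := by unfold Spec_is_occupied; infer_instance

-- ===== CLAIM (what is proved, stated in full; the proofs are below) =====
def Claim_equal_is_occupied : Prop := ∀ (grid : List (List Int)) (position : Int) (by_default : Int), Dom_is_occupied grid position by_default → Spec_is_occupied grid position by_default (is_occupied grid position by_default)

-- ===== LEMMAS AND PROOFS =====

-- A's inner loop characterised: when the target has already been passed or lies beyond this
-- row it returns (none, count + len); when it lies inside, it returns the hit via pyGet?.
lemma isOccInner_miss (row : List Int) (position by_default count : Int)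
    (h : position ≤ count ∨ count + (row.length : Int) < position) :
    isOccInner row position by_default count = (none, count + (row.length : Int)) := by
  induction row generalizing count with
  | nil => simp [isOccInner]
  | cons x xs ih =>
    simp only [isOccInner, List.length_cons]
    have hne : position ≠ count + 1 := by
      rcases h with h | h
      · omega
      · simp only [List.length_cons] at h; push_cast at h; omega
    rw [if_neg (by simpa using hne)]
    have h' : position ≤ count + 1 ∨ count + 1 + (xs.length : Int) < position := by
      rcases h with h | h
      · left; omega
      · right; simp only [List.length_cons] at h; push_cast at h ⊢; omega
    rw [ih (count + 1) h']
    simp only [Prod.mk.injEq, true_and]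
    push_cast; ring

lemma isOccInner_hit (row : List Int) (position by_default count : Int)
    (h1 : count < position) (h2 : position ≤ count + (row.length : Int)) :
    (isOccInner row position by_default count).1 =
      match PySem.List.pyGet? row (position - count - 1) with
      | some v => some (decide (v ≠ by_default))
      | none => none := by
  induction row generalizing count with
  | nil => simp at h2; omega
  | cons x xs ih =>
    simp only [isOccInner]
    by_cases he : position = count + 1
    · have : position - count - 1 = 0 := by omega
      rw [this]
      simp [he]
    · rw [if_neg (by simpa using he)]
      have h1' : count + 1 < position := by omega
      have h2' : position ≤ count + 1 + (xs.length : Int) := by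
        simp only [List.length_cons] at h2; push_cast at h2; omega
      rw [ih (count + 1) h1' h2']
      have hidx : position - count - 1 = (position - (count + 1) - 1) + 1 := by omega
      have hnn : 0 ≤ position - (count + 1) - 1 := by omega
      rw [hidx]
      rw [show position - (count + 1) - 1 = ((position - (count + 1) - 1).toNat : Int) by omega]
      rw [PySem.List.pyGet?_cons_succ]

-- Main invariant: the outer loop with counter `count` behaves like B's loop on p = position - count.
lemma isOccOuter_eq (grid : List (List Int)) (position by_default count : Int) :
    isOccOuter grid position by_default count =
      if position ≤ count then none else isOccAltLoop grid (position - count) by_default := by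
  induction grid generalizing count with
  | nil => simp [isOccOuter, isOccAltLoop]
  | cons r rs ih =>
    simp only [isOccOuter, isOccAltLoop]
    by_cases hle : position ≤ count
    · rw [isOccInner_miss r position by_default count (Or.inl hle)]
      rw [ih]
      rw [if_pos hle, if_pos (by omega)]
    · rw [if_neg hle]
      by_cases hin : position - count ≤ (r.length : Int)
      · rw [if_pos hin]
        have := isOccInner_hit r position by_default count (by omega) (by omega)
        rcases hfst : isOccInner r position by_default count with ⟨ob, c⟩
        rw [hfst] at this
        simp only at this
        have harg : position - count - 1 = position - count - 1 := rfl
        cases hg : PySem.List.pyGet? r (position - count - 1) with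
        | some v =>
          rw [hg] at this; rw [this]
        | none =>
          -- index in range, so pyGet? cannot be none
          exfalso
          have : PySem.Raise.InRange r.length (position - count - 1) := by
            unfold PySem.Raise.InRange
            constructor <;> omega
          rw [PySem.List.pyGet?_eq_none_iff] at hg
          exact hg this
      · rw [if_neg hin]
        rw [isOccInner_miss r position by_default count (Or.inr (by omega))]
        dsimp only
        rw [ih]
        rw [if_neg (by omega)]
        congr 1
        omega

-- ===== VERDICT (by name: the statement is the Claim_ definition above) =====
theorem is_occupied_spec : Claim_equal_is_occupied := by
  intro grid position by_default _
  unfold Spec_is_occupied is_occupied is_occupied_alt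
  rw [isOccOuter_eq]
  by_cases h : position < 1
  · rw [if_pos h, if_pos (by omega)]
  · rw [if_neg h, if_neg (by omega)]
    norm_num
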